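-- pv_equiv track=rewrite | github.com/capjiaer/EDP_AI | edp_center/main/cli/commands/release/release_file_mapper.py | build_mappings_from_patterns
-- ===== SOURCE A (Python) =====
-- from typing import Dict, List, Tuple
--
-- def build_mappings_from_patterns(patterns: List[str]) -> Dict[str, str]:
--     """从模式列表构建映射"""
--     # 简单实现：将所有模式映射到对应的目录
--     mappings = {}
--     for pattern in patterns:
--         # 根据文件扩展名推断目标目录
--         ext = pattern.split('.')[-1] if '.' in pattern else 'other'
--         target_dir = ext.lower()
--         if target_dir not in mappings:
--             mappings[target_dir] = []
--         mappings[target_dir].append(pattern)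
--
--     # 转换为字符串格式
--     return {k: ' '.join(v) for k, v in mappings.items()}
-- ===== SOURCE B (Python) =====
-- def build_mappings_from_patterns(patterns):
--     """Staged passes: compute each pattern's key once, dedup keys in first-occurrence
--     order, then join the matching patterns per key."""
--     keyed = [((p.split('.')[-1] if '.' in p else 'other').lower(), p) for p in patterns]
--     return {k: ' '.join(p for kk, p in keyed if kk == k)
--             for k in dict.fromkeys(kk for kk, _ in keyed)}
-- ===== Notes on version B (the rewrite author's own statement) =====
-- stated objective: alternative
-- what changed: Replaces A's single-pass dict-of-lists accumulation with staged passes: key each pattern once, dedup the keys in first-occurrence order, then build each group's joined string by filtering the keyed list.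
import Mathlib
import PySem

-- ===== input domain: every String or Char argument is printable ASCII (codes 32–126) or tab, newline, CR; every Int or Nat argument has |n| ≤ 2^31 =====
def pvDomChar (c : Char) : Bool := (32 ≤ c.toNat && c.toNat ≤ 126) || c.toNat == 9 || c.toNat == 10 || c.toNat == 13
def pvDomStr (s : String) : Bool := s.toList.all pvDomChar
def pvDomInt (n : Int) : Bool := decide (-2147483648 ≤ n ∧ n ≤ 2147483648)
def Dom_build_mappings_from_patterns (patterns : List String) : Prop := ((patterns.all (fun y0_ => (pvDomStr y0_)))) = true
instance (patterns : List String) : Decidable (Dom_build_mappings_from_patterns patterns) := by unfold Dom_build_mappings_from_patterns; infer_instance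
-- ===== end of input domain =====

-- B regroups A's single-pass dict-of-lists accumulation as staged passes (key once,
-- dedup keys, filter-and-join per key); same result, no speed claim.

-- extension key, identical expression in both Pythons:
-- (pattern.split('.')[-1] if '.' in pattern else 'other').lower()
-- (split('.') never returns an empty list, so the [-1] IndexError default "" is unreachable)
-- (split? is none only for sep = "", and split('.') is never empty, so both getD
-- defaults are unreachable here)
def pvKey (p : String) : String :=
  PySem.Str.lower
    (if PySem.Str.isIn "." p then
       (PySem.List.pyGet? ((PySem.Str.split? p ".").getD []) (-1)).getD ""
     else "other")

-- ===== PORT A =====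
def build_mappings_from_patterns (patterns : List String) : List (String × String) :=
  let mappings : PySem.Dict String (List String) :=
    patterns.foldl
      (fun d pattern =>
        let target_dir := pvKey pattern
        let d1 := if d.contains target_dir then d else d.insert target_dir []
        d1.insert target_dir (d1.getD target_dir [] ++ [pattern]))
      PySem.Dict.empty
  mappings.items.map (fun kv => (kv.1, PySem.Str.join " " kv.2))

-- ===== PORT B =====
def build_mappings_from_patterns_alt (patterns : List String) : List (String × String) :=
  let keyed := patterns.map (fun p => (pvKey p, p))
  (PySem.List.dedup (keyed.map Prod.fst)).map
    (fun k => (k, PySem.Str.join " " ((keyed.filter (fun q => q.1 == k)).map Prod.snd)))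

-- ===== PRECONDITION & SPEC =====
def Spec_build_mappings_from_patterns (patterns : List String) (out : List (String × String)) : Prop := out = build_mappings_from_patterns_alt patterns
instance (patterns : List String) (out : List (String × String)) : Decidable (Spec_build_mappings_from_patterns patterns out) := by unfold Spec_build_mappings_from_patterns; infer_instance

-- ===== CLAIM =====
def Claim_equal_build_mappings_from_patterns : Prop := ∀ (patterns : List String), Dom_build_mappings_from_patterns patterns → Spec_build_mappings_from_patterns patterns (build_mappings_from_patterns patterns)

-- ===== LEMMAS AND PROOFS =====

-- A's loop body (conditional empty-list insert, then append) is one dict `modify`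
lemma stepA_eq_modify (d : PySem.Dict String (List String)) (p : String) :
    (let d1 := if d.contains (pvKey p) then d else d.insert (pvKey p) [];
     d1.insert (pvKey p) (d1.getD (pvKey p) [] ++ [p]))
      = d.modify (pvKey p) [] (· ++ [p]) := by
  by_cases h : d.contains (pvKey p)
  · simp [h, PySem.Dict.modify]
  · have h' : d.contains (pvKey p) = false := by simpa using h
    simp [h', PySem.Dict.getD_insert_self, PySem.Dict.insert_insert_self,
      PySem.Dict.modify, PySem.Dict.getD_of_not_contains d [] h']

-- ===== VERDICT =====
theorem build_mappings_from_patterns_spec : Claim_equal_build_mappings_from_patterns := by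
  intro patterns _
  unfold Spec_build_mappings_from_patterns build_mappings_from_patterns build_mappings_from_patterns_alt
  dsimp only []
  have hfold :
      patterns.foldl
        (fun d pattern =>
          let target_dir := pvKey pattern
          let d1 := if d.contains target_dir then d else d.insert target_dir []
          d1.insert target_dir (d1.getD target_dir [] ++ [pattern]))
        PySem.Dict.empty
      = (patterns.map (fun p => (pvKey p, p))).foldl
          (fun d q => d.modify q.1 [] (· ++ [q.2])) PySem.Dict.empty := by
    rw [List.foldl_map]
    apply PySem.List.foldl_congr_mem
    intro acc p _
    exact stepA_eq_modify acc p
  rw [hfold]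
  set keyed := patterns.map (fun p => (pvKey p, p)) with hkeyed
  set D := keyed.foldl (fun d q => d.modify q.1 [] (· ++ [q.2])) PySem.Dict.empty with hD
  have hkeys : D.keys = PySem.Set.ofList (keyed.map Prod.fst) := by
    rw [hD]
    rw [PySem.Dict.keys_foldl_modify_key (key := Prod.fst)
        (f := fun d (q : String × String) => (· ++ [q.2]))]
    simp [PySem.Set.update, PySem.Set.ofList_eq_foldl]
  have hnodup : D.keys.Nodup := by
    rw [hkeys]; exact PySem.Set.nodup_ofList _
  have hitems := PySem.Dict.items_eq_map_keys D hnodup []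
  rw [hitems, hkeys]
  have hgetD : ∀ k, D.getD k [] = (keyed.filter (fun q => q.1 == k)).map Prod.snd := by
    intro k
    rw [hD, PySem.Dict.getD_foldl_modify_append]
    simp
  simp only [hgetD, List.map_map, PySem.List.dedup_eq_ofList]
  rfl
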